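-- pv_equiv track=rewrite | github.com/Raashi/elliptic_curves | generation.py | choose_m
-- ===== SOURCE A (Python) =====
-- m_table_log = [100, 150, 200, 250, 300, 350, 400]
--
-- m_table = {
--     1:    [71, 141, 232, 342, 470, 617, 782],
--     1.57: [21,  42,  67,  99, 136, 178, 225],
--     1.92: [12,  24,  39,  58,  78, 103, 129]
-- }
--
-- def choose_m(size):
--     c = 1.92
--     if size in m_table_log:
--         return m_table[c][m_table_log.index(size)]
--     else:
--         if size < m_table_log[0]:
--             return m_table[c][0]
--         elif size > m_table_log[-1]:
--             return m_table[c][-1]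
--         else:
--             for a, b in zip(m_table_log[:-1], m_table_log[1:]):
--                 if a < size < b:
--                     return m_table[c][m_table_log.index(b)]
-- ===== SOURCE B (Python) =====
-- m_table_log = [100, 150, 200, 250, 300, 350, 400]
--
-- m_table = {
--     1:    [71, 141, 232, 342, 470, 617, 782],
--     1.57: [21,  42,  67,  99, 136, 178, 225],
--     1.92: [12,  24,  39,  58,  78, 103, 129]
-- }
--
-- def choose_m(size):
--     idx = min(sum(1 for t in m_table_log if t < size), len(m_table_log) - 1)
--     return m_table[1.92][idx]
-- ===== Notes on version B (the rewrite author's own statement) =====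
-- stated objective: simpler
-- what changed: Replaces the membership test, below/above branches and interval-scan loop with a single index computation: the answer is the table row at min(count of thresholds strictly below size, last index).
import Mathlib
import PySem

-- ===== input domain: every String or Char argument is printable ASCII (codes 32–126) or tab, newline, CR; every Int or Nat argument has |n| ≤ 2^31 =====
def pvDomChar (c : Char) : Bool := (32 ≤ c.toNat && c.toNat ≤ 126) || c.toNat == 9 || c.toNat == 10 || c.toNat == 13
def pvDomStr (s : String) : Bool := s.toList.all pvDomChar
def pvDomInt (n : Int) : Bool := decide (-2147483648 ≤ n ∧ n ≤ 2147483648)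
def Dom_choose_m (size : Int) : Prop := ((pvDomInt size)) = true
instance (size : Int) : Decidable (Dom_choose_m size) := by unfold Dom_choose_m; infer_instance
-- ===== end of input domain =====

-- B replaces A's membership test + branch chain + interval scan by one clamped
-- count of thresholds below size (simpler decomposition, same result).
-- Python's m_table has float keys; A only ever reads the fixed row m_table[1.92],
-- so both ports carry that row as the constant list mRow.

-- ===== PORT A =====
def mTableLog : List Int := [100, 150, 200, 250, 300, 350, 400]
def mRow : List Int := [12, 24, 39, 58, 78, 103, 129]

-- the for-loop over zip(m_table_log[:-1], m_table_log[1:]); Python falls through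
-- to None only for non-integer sizes, unreachable on Int, so `.getD 0` covers
-- that dead path.
def chooseLoop (size : Int) : List (Int × Int) → Option Int
  | [] => none
  | (a, b) :: rest =>
      if a < size ∧ size < b then
        (PySem.List.index? mTableLog b).bind (fun i => PySem.List.pyGet? mRow i)
      else chooseLoop size rest

def choose_m (size : Int) : Int :=
  if size ∈ mTableLog then
    (((PySem.List.index? mTableLog size).bind (fun i => PySem.List.pyGet? mRow i)).getD 0)
  else if size < (PySem.List.pyGet? mTableLog 0).getD 0 then
    (PySem.List.pyGet? mRow 0).getD 0
  else if size > (PySem.List.pyGet? mTableLog (-1)).getD 0 then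
    (PySem.List.pyGet? mRow (-1)).getD 0
  else
    (chooseLoop size ((PySem.List.slice mTableLog none (some (-1))).zip
                      (PySem.List.slice mTableLog (some 1) none))).getD 0

-- ===== PORT B =====
def choose_m_alt (size : Int) : Int :=
  (PySem.List.pyGet? mRow (min ((mTableLog.countP (fun t => t < size)) : Int)
      ((mTableLog.length : Int) - 1))).getD 0

-- ===== PRECONDITION & SPEC =====
def Spec_choose_m (size : Int) (out : Int) : Prop := out = choose_m_alt size
instance (size : Int) (out : Int) : Decidable (Spec_choose_m size out) := by unfold Spec_choose_m; infer_instance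

-- ===== CLAIM (what is proved, stated in full; the proofs are below) =====
def Claim_equal_choose_m : Prop := ∀ (size : Int), Dom_choose_m size → Spec_choose_m size (choose_m size)

-- ===== LEMMAS AND PROOFS =====
theorem pvGet0 : (PySem.List.pyGet? mTableLog 0).getD 0 = 100 := by decide
theorem pvGetLast : (PySem.List.pyGet? mTableLog (-1)).getD 0 = 400 := by decide
theorem pvZip : (PySem.List.slice mTableLog none (some (-1))).zip
    (PySem.List.slice mTableLog (some 1) none)
    = [(100,150),(150,200),(200,250),(250,300),(300,350),(350,400)] := by decide
theorem evalA_r0 (size : Int) (hm : size ∉ mTableLog) (h2 : size < 100) :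
    choose_m size = 12 := by
  unfold choose_m
  rw [if_neg hm, pvGet0, if_pos h2]
  decide

theorem evalB_r0 (size : Int) (h2 : size < 100) : choose_m_alt size = 12 := by
  unfold choose_m_alt mTableLog
  simp only [List.countP, List.countP.go,
    decide_eq_false (by omega : ¬((100:Int) < size)), decide_eq_false (by omega : ¬((150:Int) < size)), decide_eq_false (by omega : ¬((200:Int) < size)), decide_eq_false (by omega : ¬((250:Int) < size)), decide_eq_false (by omega : ¬((300:Int) < size)), decide_eq_false (by omega : ¬((350:Int) < size)), decide_eq_false (by omega : ¬((400:Int) < size))]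
  decide

theorem evalA_r1 (size : Int) (hm : size ∉ mTableLog)
    (h1 : (100:Int) < size) (h2 : size < (150:Int)) : choose_m size = 24 := by
  unfold choose_m
  rw [if_neg hm, pvGet0, if_neg (by omega : ¬ size < 100), pvGetLast,
    if_neg (by omega : ¬ size > 400), pvZip]
  simp only [chooseLoop]
  rw [if_pos ⟨h1, h2⟩]
  decide

theorem evalB_r1 (size : Int) (h1 : (100:Int) < size) (h2 : size < (150:Int)) :
    choose_m_alt size = 24 := by
  unfold choose_m_alt mTableLog
  simp only [List.countP, List.countP.go, decide_eq_true (by omega : (100:Int) < size), decide_eq_false (by omega : ¬((150:Int) < size)), decide_eq_false (by omega : ¬((200:Int) < size)), decide_eq_false (by omega : ¬((250:Int) < size)), decide_eq_false (by omega : ¬((300:Int) < size)), decide_eq_false (by omega : ¬((350:Int) < size)), decide_eq_false (by omega : ¬((400:Int) < size))]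
  decide

theorem evalA_r2 (size : Int) (hm : size ∉ mTableLog)
    (h1 : (150:Int) < size) (h2 : size < (200:Int)) : choose_m size = 39 := by
  unfold choose_m
  rw [if_neg hm, pvGet0, if_neg (by omega : ¬ size < 100), pvGetLast,
    if_neg (by omega : ¬ size > 400), pvZip]
  simp only [chooseLoop]
  rw [if_neg (by omega : ¬(((100:Int) < size) ∧ size < (150:Int)))]
  rw [if_pos ⟨h1, h2⟩]
  decide

theorem evalB_r2 (size : Int) (h1 : (150:Int) < size) (h2 : size < (200:Int)) :
    choose_m_alt size = 39 := by
  unfold choose_m_alt mTableLog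
  simp only [List.countP, List.countP.go, decide_eq_true (by omega : (100:Int) < size), decide_eq_true (by omega : (150:Int) < size), decide_eq_false (by omega : ¬((200:Int) < size)), decide_eq_false (by omega : ¬((250:Int) < size)), decide_eq_false (by omega : ¬((300:Int) < size)), decide_eq_false (by omega : ¬((350:Int) < size)), decide_eq_false (by omega : ¬((400:Int) < size))]
  decide

theorem evalA_r3 (size : Int) (hm : size ∉ mTableLog)
    (h1 : (200:Int) < size) (h2 : size < (250:Int)) : choose_m size = 58 := by
  unfold choose_m
  rw [if_neg hm, pvGet0, if_neg (by omega : ¬ size < 100), pvGetLast,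
    if_neg (by omega : ¬ size > 400), pvZip]
  simp only [chooseLoop]
  rw [if_neg (by omega : ¬(((100:Int) < size) ∧ size < (150:Int)))]
  rw [if_neg (by omega : ¬(((150:Int) < size) ∧ size < (200:Int)))]
  rw [if_pos ⟨h1, h2⟩]
  decide

theorem evalB_r3 (size : Int) (h1 : (200:Int) < size) (h2 : size < (250:Int)) :
    choose_m_alt size = 58 := by
  unfold choose_m_alt mTableLog
  simp only [List.countP, List.countP.go, decide_eq_true (by omega : (100:Int) < size), decide_eq_true (by omega : (150:Int) < size), decide_eq_true (by omega : (200:Int) < size), decide_eq_false (by omega : ¬((250:Int) < size)), decide_eq_false (by omega : ¬((300:Int) < size)), decide_eq_false (by omega : ¬((350:Int) < size)), decide_eq_false (by omega : ¬((400:Int) < size))]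
  decide

theorem evalA_r4 (size : Int) (hm : size ∉ mTableLog)
    (h1 : (250:Int) < size) (h2 : size < (300:Int)) : choose_m size = 78 := by
  unfold choose_m
  rw [if_neg hm, pvGet0, if_neg (by omega : ¬ size < 100), pvGetLast,
    if_neg (by omega : ¬ size > 400), pvZip]
  simp only [chooseLoop]
  rw [if_neg (by omega : ¬(((100:Int) < size) ∧ size < (150:Int)))]
  rw [if_neg (by omega : ¬(((150:Int) < size) ∧ size < (200:Int)))]
  rw [if_neg (by omega : ¬(((200:Int) < size) ∧ size < (250:Int)))]
  rw [if_pos ⟨h1, h2⟩]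
  decide

theorem evalB_r4 (size : Int) (h1 : (250:Int) < size) (h2 : size < (300:Int)) :
    choose_m_alt size = 78 := by
  unfold choose_m_alt mTableLog
  simp only [List.countP, List.countP.go, decide_eq_true (by omega : (100:Int) < size), decide_eq_true (by omega : (150:Int) < size), decide_eq_true (by omega : (200:Int) < size), decide_eq_true (by omega : (250:Int) < size), decide_eq_false (by omega : ¬((300:Int) < size)), decide_eq_false (by omega : ¬((350:Int) < size)), decide_eq_false (by omega : ¬((400:Int) < size))]
  decide

theorem evalA_r5 (size : Int) (hm : size ∉ mTableLog)
    (h1 : (300:Int) < size) (h2 : size < (350:Int)) : choose_m size = 103 := by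
  unfold choose_m
  rw [if_neg hm, pvGet0, if_neg (by omega : ¬ size < 100), pvGetLast,
    if_neg (by omega : ¬ size > 400), pvZip]
  simp only [chooseLoop]
  rw [if_neg (by omega : ¬(((100:Int) < size) ∧ size < (150:Int)))]
  rw [if_neg (by omega : ¬(((150:Int) < size) ∧ size < (200:Int)))]
  rw [if_neg (by omega : ¬(((200:Int) < size) ∧ size < (250:Int)))]
  rw [if_neg (by omega : ¬(((250:Int) < size) ∧ size < (300:Int)))]
  rw [if_pos ⟨h1, h2⟩]
  decide

theorem evalB_r5 (size : Int) (h1 : (300:Int) < size) (h2 : size < (350:Int)) :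
    choose_m_alt size = 103 := by
  unfold choose_m_alt mTableLog
  simp only [List.countP, List.countP.go, decide_eq_true (by omega : (100:Int) < size), decide_eq_true (by omega : (150:Int) < size), decide_eq_true (by omega : (200:Int) < size), decide_eq_true (by omega : (250:Int) < size), decide_eq_true (by omega : (300:Int) < size), decide_eq_false (by omega : ¬((350:Int) < size)), decide_eq_false (by omega : ¬((400:Int) < size))]
  decide

theorem evalA_r6 (size : Int) (hm : size ∉ mTableLog)
    (h1 : (350:Int) < size) (h2 : size < (400:Int)) : choose_m size = 129 := by
  unfold choose_m
  rw [if_neg hm, pvGet0, if_neg (by omega : ¬ size < 100), pvGetLast,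
    if_neg (by omega : ¬ size > 400), pvZip]
  simp only [chooseLoop]
  rw [if_neg (by omega : ¬(((100:Int) < size) ∧ size < (150:Int)))]
  rw [if_neg (by omega : ¬(((150:Int) < size) ∧ size < (200:Int)))]
  rw [if_neg (by omega : ¬(((200:Int) < size) ∧ size < (250:Int)))]
  rw [if_neg (by omega : ¬(((250:Int) < size) ∧ size < (300:Int)))]
  rw [if_neg (by omega : ¬(((300:Int) < size) ∧ size < (350:Int)))]
  rw [if_pos ⟨h1, h2⟩]
  decide

theorem evalB_r6 (size : Int) (h1 : (350:Int) < size) (h2 : size < (400:Int)) :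
    choose_m_alt size = 129 := by
  unfold choose_m_alt mTableLog
  simp only [List.countP, List.countP.go, decide_eq_true (by omega : (100:Int) < size), decide_eq_true (by omega : (150:Int) < size), decide_eq_true (by omega : (200:Int) < size), decide_eq_true (by omega : (250:Int) < size), decide_eq_true (by omega : (300:Int) < size), decide_eq_true (by omega : (350:Int) < size), decide_eq_false (by omega : ¬((400:Int) < size))]
  decide

theorem evalA_r7 (size : Int) (hm : size ∉ mTableLog) (h1 : (400:Int) < size) :
    choose_m size = 129 := by
  unfold choose_m
  rw [if_neg hm, pvGet0, if_neg (by omega : ¬ size < 100), pvGetLast, if_pos h1]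
  decide

theorem evalB_r7 (size : Int) (h1 : (400:Int) < size) : choose_m_alt size = 129 := by
  unfold choose_m_alt mTableLog
  simp only [List.countP, List.countP.go,
    decide_eq_true (by omega : (100:Int) < size), decide_eq_true (by omega : (150:Int) < size), decide_eq_true (by omega : (200:Int) < size), decide_eq_true (by omega : (250:Int) < size), decide_eq_true (by omega : (300:Int) < size), decide_eq_true (by omega : (350:Int) < size), decide_eq_true (by omega : (400:Int) < size)]
  decide

-- ===== VERDICT (by name: the statement is the Claim_ definition above) =====
theorem choose_m_spec : Claim_equal_choose_m := by
  intro size _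
  unfold Spec_choose_m
  by_cases hm : size ∈ mTableLog
  · fin_cases hm <;> decide
  · have hm' := hm
    simp only [mTableLog, List.mem_cons, List.not_mem_nil, or_false, not_or] at hm'
    obtain ⟨n1, n2, n3, n4, n5, n6, n7⟩ := hm'
    have regions : size < 100 ∨ ((100:Int) < size ∧ size < (150:Int)) ∨ ((150:Int) < size ∧ size < (200:Int)) ∨ ((200:Int) < size ∧ size < (250:Int)) ∨ ((250:Int) < size ∧ size < (300:Int)) ∨ ((300:Int) < size ∧ size < (350:Int)) ∨ ((350:Int) < size ∧ size < (400:Int)) ∨ (400:Int) < size := by omega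
    rcases regions with h | h | h | h | h | h | h | h
    · rw [evalA_r0 size hm h, evalB_r0 size h]
    · rw [evalA_r1 size hm h.1 h.2, evalB_r1 size h.1 h.2]
    · rw [evalA_r2 size hm h.1 h.2, evalB_r2 size h.1 h.2]
    · rw [evalA_r3 size hm h.1 h.2, evalB_r3 size h.1 h.2]
    · rw [evalA_r4 size hm h.1 h.2, evalB_r4 size h.1 h.2]
    · rw [evalA_r5 size hm h.1 h.2, evalB_r5 size h.1 h.2]
    · rw [evalA_r6 size hm h.1 h.2, evalB_r6 size h.1 h.2]
    · rw [evalA_r7 size hm h, evalB_r7 size h]
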